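-- pv_equiv track=rewrite | github.com/Grozby/out-loud | advent_of_code/2024/day4.py | return_diagonal_strings
-- ===== SOURCE A (Python) =====
-- from typing import Iterable
--
-- def return_diagonal_strings(word_search: list[list[str]]) -> Iterable[str]:
--     for i in range(len(word_search) + len(word_search[0]) - 1):
--         yield "".join(
--             word_search[row][col]
--             for row in range(len(word_search))
--             for col in range(len(word_search[0]))
--             if row + col == i
--         )
--     for i in range(-len(word_search) + 1, len(word_search[0])):
--         yield "".join(
--             word_search[row][col]
--             for row in range(len(word_search))
--             for col in range(len(word_search[0]))
--             if row - col == i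
--         )
-- ===== SOURCE B (Python) =====
-- def return_diagonal_strings(word_search):
--     # One pass over the grid: bucket each cell by its anti-diagonal (r+c) and
--     # diagonal (r-c) index, then emit the joined buckets in the same index
--     # order the original iterates. Missing buckets yield "".
--     rows = len(word_search)
--     cols = len(word_search[0])
--     anti = {}
--     diag = {}
--     for r in range(rows):
--         row = word_search[r]
--         for c in range(cols):
--             anti.setdefault(r + c, []).append(row[c])
--             diag.setdefault(r - c, []).append(row[c])
--     for i in range(rows + cols - 1):
--         yield "".join(anti.get(i, []))
--     for i in range(-rows + 1, cols):
--         yield "".join(diag.get(i, []))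
-- ===== Notes on version B (the rewrite author's own statement) =====
-- stated objective: faster
-- what changed: Instead of rescanning the whole R*C grid once per diagonal index, B makes one pass over the grid bucketing every cell by its anti-diagonal key r+c and diagonal key r-c into two dicts, then joins the buckets in the original's index order.
import Mathlib
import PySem

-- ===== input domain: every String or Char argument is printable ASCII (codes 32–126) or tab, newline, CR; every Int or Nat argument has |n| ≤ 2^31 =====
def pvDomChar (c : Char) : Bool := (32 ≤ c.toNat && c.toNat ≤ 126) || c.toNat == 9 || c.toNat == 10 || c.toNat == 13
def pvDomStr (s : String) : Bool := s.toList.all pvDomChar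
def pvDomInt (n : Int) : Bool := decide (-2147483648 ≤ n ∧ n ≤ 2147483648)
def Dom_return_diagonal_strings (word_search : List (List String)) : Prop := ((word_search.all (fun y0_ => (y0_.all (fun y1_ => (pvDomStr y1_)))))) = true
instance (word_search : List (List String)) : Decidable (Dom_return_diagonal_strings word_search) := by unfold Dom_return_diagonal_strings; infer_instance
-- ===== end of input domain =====

-- ===== PORT A =====
-- B replaces A's per-diagonal rescans of the whole grid by one bucketing pass (objective: faster, measured).
def return_diagonal_strings (word_search : List (List String)) : List String :=
  let R := word_search.length
  let C := (word_search.getD 0 []).length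
  ((List.range (R + C - 1)).map (fun i =>
    String.join ((List.range R).flatMap (fun (row : Nat) =>
      (List.range C).filterMap (fun (col : Nat) =>
        if row + col = i then some ((word_search.getD row []).getD col "") else none)))))
  ++ ((PySem.List.pyRange (-(R : Int) + 1) (C : Int) 1).map (fun i =>
    String.join ((List.range R).flatMap (fun (row : Nat) =>
      (List.range C).filterMap (fun (col : Nat) =>
        if ((row : Int) - (col : Int) = i) then some ((word_search.getD row []).getD col "") else none)))))

-- ===== PORT B =====
def return_diagonal_strings_alt (word_search : List (List String)) : List String :=
  let R := word_search.length
  let C := (word_search.getD 0 []).length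
  let st := (List.range R).foldl (fun st r =>
      (List.range C).foldl (fun st c =>
        (st.1.modify ((r : Int) + (c : Int)) [] (· ++ [(word_search.getD r []).getD c ""]),
         st.2.modify ((r : Int) - (c : Int)) [] (· ++ [(word_search.getD r []).getD c ""]))) st)
    ((PySem.Dict.empty : PySem.Dict Int (List String)),
     (PySem.Dict.empty : PySem.Dict Int (List String)))
  ((List.range (R + C - 1)).map (fun (i : Nat) => String.join (st.1.getD (i : Int) [])))
  ++ ((PySem.List.pyRange (-(R : Int) + 1) (C : Int) 1).map (fun i => String.join (st.2.getD i [])))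

-- ===== PRECONDITION & SPEC =====
-- Pre_ excludes exactly the inputs where the Python A raises IndexError:
-- the empty grid (word_search[0]) and grids with a row shorter than row 0.
def Pre_return_diagonal_strings (word_search : List (List String)) : Prop :=
  word_search ≠ [] ∧
  ∀ row ∈ word_search, (word_search.headD []).length ≤ row.length
instance (word_search : List (List String)) : Decidable (Pre_return_diagonal_strings word_search) := by
  unfold Pre_return_diagonal_strings; infer_instance
def pvWitness_return_diagonal_strings : List (List String) := [["a", "b"], ["c", "d"]]
def Spec_return_diagonal_strings (word_search : List (List String)) (out : List String) : Prop := out = return_diagonal_strings_alt word_search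
instance (word_search : List (List String)) (out : List String) : Decidable (Spec_return_diagonal_strings word_search out) := by unfold Spec_return_diagonal_strings; infer_instance

-- ===== CLAIM (what is proved, stated in full; the proofs are below) =====
def Claim_equal_return_diagonal_strings : Prop := ∀ (word_search : List (List String)), Dom_return_diagonal_strings word_search → Pre_return_diagonal_strings word_search → Spec_return_diagonal_strings word_search (return_diagonal_strings word_search)

-- ===== LEMMAS AND PROOFS =====

theorem pv_flatMap_congr {α β : Type} (l : List α) (f g : α → List β)
    (h : ∀ x ∈ l, f x = g x) : l.flatMap f = l.flatMap g := by
  induction l with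
  | nil => rfl
  | cons a t ih =>
    simp only [List.flatMap_cons, h a (List.mem_cons_self), 
      ih (fun x hx => h x (List.mem_cons_of_mem _ hx))]

theorem pv_filterMap_eq_map_filter (l : List Nat) (k : Nat → Int) (v : Nat → String) (i : Int) :
    ((l.filter (fun c => k c == i)).map v)
      = l.filterMap (fun c => if k c = i then some (v c) else none) := by
  induction l with
  | nil => rfl
  | cons a t ih =>
    by_cases h : k a = i
    · simp [h, ih]
    · simp [h, ih]

-- bucket content of a grouping fold over keyed cells = the keyed selection of the cell list
theorem pv_bucket_eq (l : List Nat) (C : Nat) (key : Nat → Nat → Int) (cell : Nat → Nat → String)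
    (i : Int) :
    ((l.foldl (fun d r => (List.range C).foldl
        (fun d c => d.modify (key r c) [] (· ++ [cell r c])) d)
        (PySem.Dict.empty : PySem.Dict Int (List String))).getD i [])
    = l.flatMap (fun r =>
        (List.range C).filterMap (fun c => if key r c = i then some (cell r c) else none)) := by
  have hfold : (l.foldl (fun d r => (List.range C).foldl
        (fun d c => d.modify (key r c) [] (· ++ [cell r c])) d)
        (PySem.Dict.empty : PySem.Dict Int (List String)))
      = ((l.flatMap (fun r => (List.range C).map (fun c => (key r c, cell r c)))).foldl
          (fun d q => d.modify q.1 [] (· ++ [q.2]))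
          (PySem.Dict.empty : PySem.Dict Int (List String))) := by
    rw [List.foldl_flatMap]
    refine PySem.List.foldl_congr_mem _ _ _ _ (fun d r _ => ?_)
    rw [List.foldl_map]
  rw [hfold, PySem.Dict.getD_foldl_modify_append, PySem.Dict.getD_empty, List.nil_append,
    List.filter_flatMap, List.map_flatMap]
  refine pv_flatMap_congr _ _ _ (fun r _ => ?_)
  rw [List.filter_map, List.map_map]
  exact pv_filterMap_eq_map_filter _ _ _ _

theorem return_diagonal_strings_spec : Claim_equal_return_diagonal_strings := by
  intro ws _ _
  show return_diagonal_strings ws = return_diagonal_strings_alt ws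
  unfold return_diagonal_strings return_diagonal_strings_alt
  have hsplit : ((List.range ws.length).foldl (fun st r =>
      (List.range (ws.getD 0 []).length).foldl (fun st c =>
        (st.1.modify ((r : Int) + (c : Int)) [] (· ++ [(ws.getD r []).getD c ""]),
         st.2.modify ((r : Int) - (c : Int)) [] (· ++ [(ws.getD r []).getD c ""]))) st)
      ((PySem.Dict.empty : PySem.Dict Int (List String)),
       (PySem.Dict.empty : PySem.Dict Int (List String))))
    = ((List.range ws.length).foldl (fun d r => (List.range (ws.getD 0 []).length).foldl
          (fun d c => d.modify ((r : Int) + (c : Int)) [] (· ++ [(ws.getD r []).getD c ""])) d)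
        (PySem.Dict.empty : PySem.Dict Int (List String)),
       (List.range ws.length).foldl (fun d r => (List.range (ws.getD 0 []).length).foldl
          (fun d c => d.modify ((r : Int) - (c : Int)) [] (· ++ [(ws.getD r []).getD c ""])) d)
        (PySem.Dict.empty : PySem.Dict Int (List String))) := by
    refine Eq.trans (PySem.List.foldl_congr_mem _ _
        (fun (st : PySem.Dict Int (List String) × PySem.Dict Int (List String)) (r : Nat) =>
          ((List.range (ws.getD 0 []).length).foldl (fun a (c : Nat) =>
              PySem.Dict.modify a ((r : Int) + (c : Int)) [] (· ++ [(ws.getD r []).getD c ""])) st.1,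
           (List.range (ws.getD 0 []).length).foldl (fun a (c : Nat) =>
              PySem.Dict.modify a ((r : Int) - (c : Int)) [] (· ++ [(ws.getD r []).getD c ""])) st.2))
        _ (fun st r _ => by
          obtain ⟨s1, s2⟩ := st
          exact PySem.List.foldl_prod_mk
            (f := fun a (c : Nat) =>
              PySem.Dict.modify a ((r : Int) + (c : Int)) [] (· ++ [(ws.getD r []).getD c ""]))
            (g := fun a (c : Nat) =>
              PySem.Dict.modify a ((r : Int) - (c : Int)) [] (· ++ [(ws.getD r []).getD c ""]))
            _ _ _))
      (PySem.List.foldl_prod_mk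
        (f := fun a (r : Nat) => (List.range (ws.getD 0 []).length).foldl (fun a (c : Nat) =>
          PySem.Dict.modify a ((r : Int) + (c : Int)) [] (· ++ [(ws.getD r []).getD c ""])) a)
        (g := fun a (r : Nat) => (List.range (ws.getD 0 []).length).foldl (fun a (c : Nat) =>
          PySem.Dict.modify a ((r : Int) - (c : Int)) [] (· ++ [(ws.getD r []).getD c ""])) a)
        _ _ _)
  simp only [hsplit]
  refine congrArg₂ (· ++ ·) ?_ ?_
  · refine List.map_congr_left (fun i _ => ?_)
    rw [pv_bucket_eq]
    refine congrArg String.join (pv_flatMap_congr _ _ _ (fun r _ => ?_))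
    refine List.filterMap_congr (fun c _ => ?_)
    by_cases h : r + c = i
    · rw [if_pos h, if_pos (show ((r : Int) + (c : Int) = ((i : Nat) : Int)) from by exact_mod_cast h)]
    · rw [if_neg h, if_neg (fun hc => h (by exact_mod_cast hc))]
  · refine List.map_congr_left (fun i _ => ?_)
    rw [pv_bucket_eq]

-- ===== VERDICT (by name: the statement is the Claim_ definition above) =====
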